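-- pv_equiv track=rewrite | github.com/ss73/TFRE40 | lab03_TF/weather_functions.py | when_is_it_spring
-- ===== SOURCE A (Python) =====
-- def when_is_it_spring(temp_list):
--     # Keeps track of whether we have found the first day or not
--     first_found = False
--     # Keeps track of how many days with a
--     # positive temperature we have found
--
--     if len(temp_list) < 7:
--         return -1
--
--     n = 0
--     # Keeps track of where the first day with positive temperatures
--     # was found
--     index = 0
--     while n < 7:
--         try:
--             if temp_list[index] > 0:
--                 n += 1
--             else:
--                 n = 0
--             index += 1
--         except IndexError:
--             return -1
--     return index-7
-- ===== SOURCE B (Python) =====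
-- def when_is_it_spring(temp_list):
--     for i in range(len(temp_list) - 6):
--         if all(t > 0 for t in temp_list[i:i+7]):
--             return i
--     return -1
-- ===== Notes on version B (the rewrite author's own statement) =====
-- stated objective: simpler
-- what changed: Replaces A's single pass with a counter that resets on non-positive days by a direct scan over window starts, testing each fixed 7-day window with all().
import Mathlib
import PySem

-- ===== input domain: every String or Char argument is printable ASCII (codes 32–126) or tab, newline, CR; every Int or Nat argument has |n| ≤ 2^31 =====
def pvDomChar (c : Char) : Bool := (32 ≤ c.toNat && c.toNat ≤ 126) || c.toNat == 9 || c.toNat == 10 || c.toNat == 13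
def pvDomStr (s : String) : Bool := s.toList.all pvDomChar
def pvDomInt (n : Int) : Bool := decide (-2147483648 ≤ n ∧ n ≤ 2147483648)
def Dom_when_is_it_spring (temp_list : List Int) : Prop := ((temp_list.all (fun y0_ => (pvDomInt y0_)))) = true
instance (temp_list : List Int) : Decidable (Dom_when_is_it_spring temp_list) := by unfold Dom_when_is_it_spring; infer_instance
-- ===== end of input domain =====

-- B replaces A's reset-counter single pass by a direct first-window search (simpler); equivalence is exact.

-- ===== PORT A =====
-- the `while n < 7` loop: n = current run of positive days, index = next position;
-- IndexError (pyGet? = none) returns -1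
def pvLoopA (l : List Int) (n index : Nat) : Int :=
  if n < 7 then
    match h : PySem.List.pyGet? l (index : Int) with
    | none => -1
    | some t => if t > 0 then pvLoopA l (n+1) (index+1) else pvLoopA l 0 (index+1)
  else (index : Int) - 7
termination_by l.length - index
decreasing_by
  all_goals
    simp only [PySem.List.pyGet?_natCast] at h
    have := (List.getElem?_eq_some_iff.mp h).1
    omega

def when_is_it_spring (temp_list : List Int) : Int :=
  if PySem.List.len temp_list < 7 then -1 else pvLoopA temp_list 0 0

-- ===== PORT B =====
-- for i in range(len(temp_list) - 6): if all(t > 0 for t in temp_list[i:i+7]): return i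
def pvLoopB (l : List Int) (i : Nat) : Int :=
  if i < l.length - 6 then
    if (PySem.List.slice l (some (i : Int)) (some ((i + 7 : Nat) : Int))).all (fun t => decide (t > 0)) then
      (i : Int)
    else pvLoopB l (i+1)
  else -1
termination_by l.length - i

def when_is_it_spring_alt (temp_list : List Int) : Int := pvLoopB temp_list 0

-- ===== PRECONDITION & SPEC =====
def Spec_when_is_it_spring (temp_list : List Int) (out : Int) : Prop := out = when_is_it_spring_alt temp_list
instance (temp_list : List Int) (out : Int) : Decidable (Spec_when_is_it_spring temp_list out) := by unfold Spec_when_is_it_spring; infer_instance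

-- ===== CLAIM (what is proved, stated in full; the proofs are below) =====
def Claim_equal_when_is_it_spring : Prop := ∀ (temp_list : List Int), Dom_when_is_it_spring temp_list → Spec_when_is_it_spring temp_list (when_is_it_spring temp_list)

-- ===== LEMMAS AND PROOFS =====

-- the slice l[i:i+7] is (l.drop i).take 7
theorem pvWindow_eq (l : List Int) (i : Nat) :
    PySem.List.slice l (some (i : Int)) (some ((i + 7 : Nat) : Int)) = (l.drop i).take 7 := by
  rw [PySem.List.slice_natCast]
  congr 1
  omega

theorem pvLoopB_stop (l : List Int) (i : Nat) (h : ¬ i < l.length - 6) : pvLoopB l i = -1 := by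
  rw [pvLoopB, if_neg h]

-- a non-positive element at p kills every window start in [p-6, p]
theorem pvLoopB_skip (l : List Int) (p : Nat) (hp : p < l.length) (hnp : ¬ (0:Int) < l[p])
    (i : Nat) (hi : i ≤ p) (h7 : p < i + 7) : pvLoopB l i = pvLoopB l (p+1) := by
  by_cases hc : i < l.length - 6
  · rw [pvLoopB, if_pos hc, pvWindow_eq]
    have hmem : l[p] ∈ (l.drop i).take 7 := by
      have hlt : p - i < 7 := by omega
      have hlen : p - i < ((l.drop i).take 7).length := by
        simp [List.length_take, List.length_drop]; omega
      have : ((l.drop i).take 7)[p - i]'hlen = l[p] := by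
        rw [List.getElem_take, List.getElem_drop]
        congr 1; omega
      rw [← this]; exact List.getElem_mem hlen
    have hfail : ¬ ((l.drop i).take 7).all (fun t => decide (t > 0)) = true := by
      intro hall
      have := List.all_eq_true.mp hall _ hmem
      simp at this
      omega
    rw [if_neg hfail]
    rcases Nat.eq_or_lt_of_le hi with heq | hlt
    · subst heq; rfl
    · exact pvLoopB_skip l p hp hnp (i+1) hlt (by omega)
  · rw [pvLoopB_stop l i hc, pvLoopB_stop]
    omega
termination_by p - i

-- invariant: n < 7 consecutive positives end just before index; A continues like B searching from index - n
theorem pvLoopA_eq (l : List Int) (n index : Nat) (hn : n < 7) (hni : n ≤ index) (hidx : index ≤ l.length)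
    (hrun : ∀ j (hj : j < index), index - n ≤ j → (0:Int) < l[j]'(by omega)) :
    pvLoopA l n index = pvLoopB l (index - n) := by
  rw [pvLoopA, if_pos hn]
  split
  case h_1 hg =>
    simp only [PySem.List.pyGet?_natCast, List.getElem?_eq_none_iff] at hg
    rw [pvLoopB_stop]
    omega
  case h_2 t hg =>
    simp only [PySem.List.pyGet?_natCast] at hg
    obtain ⟨hlt, ht⟩ := List.getElem?_eq_some_iff.mp hg
    by_cases hpos : t > 0
    · rw [if_pos hpos]
      by_cases h6 : n + 1 < 7
      · have := pvLoopA_eq l (n+1) (index+1) h6 (by omega) (by omega) (by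
          intro j hj hjl
          rcases Nat.lt_or_ge j index with hji | hji
          · exact hrun j hji (by omega)
          · have : j = index := by omega
            subst this; omega)
        rw [this]
        congr 1
        omega
      · -- n = 6: the run reaches 7; A returns index + 1 - 7 = index - 6, and the window at index - 6 is all positive
        have hn6 : n = 6 := by omega
        subst hn6
        rw [pvLoopA, if_neg (by omega)]
        rw [pvLoopB, if_pos (by omega), pvWindow_eq]
        have hall : ((l.drop (index - 6)).take 7).all (fun t => decide (t > 0)) = true := by
          apply List.all_eq_true.mpr
          intro x hx
          obtain ⟨k, hk, hxk⟩ := List.mem_iff_getElem.mp hx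
          have hk7 : k < 7 := by simp [List.length_take, List.length_drop] at hk; omega
          have hx' : x = l[index - 6 + k]'(by simp [List.length_take, List.length_drop] at hk; omega) := by
            rw [← hxk, List.getElem_take, List.getElem_drop]
          rw [hx']
          rcases Nat.lt_or_ge (index - 6 + k) index with hji | hji
          · have := hrun (index - 6 + k) hji (by omega)
            simpa using this
          · have hke : index - 6 + k = index := by omega
            simp only [hke, ht]
            simpa using hpos
        rw [if_pos hall]
        push_cast
        omega
    · rw [if_neg hpos]
      have hB := pvLoopA_eq l 0 (index+1) (by omega) (by omega) (by omega) (by intro j hj hjl; omega)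
      rw [hB]
      simp only [Nat.sub_zero]
      exact (pvLoopB_skip l index hlt (by rw [ht]; omega) (index - n) (by omega) (by omega)).symm
termination_by l.length - index

-- ===== VERDICT (by name: the statement is the Claim_ definition above) =====
theorem when_is_it_spring_spec : Claim_equal_when_is_it_spring := by
  intro l _
  unfold Spec_when_is_it_spring when_is_it_spring when_is_it_spring_alt
  by_cases h : l.length < 7
  · rw [if_pos (by simp [PySem.List.len_eq]; omega), pvLoopB_stop]
    omega
  · rw [if_neg (by simp [PySem.List.len_eq]; omega)]
    have := pvLoopA_eq l 0 0 (by omega) (by omega) (by omega) (by intro j hj _; omega)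
    simpa using this
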